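-- pv_equiv track=rewrite | github.com/JuaniBernard/calculadora-comp2 | calculator.py | calculate_final_result
-- ===== SOURCE A (Python) =====
-- def calculate_final_result(terms, results):
--     final_result = 0  # Inicializar el resultado final con el primer término
--     j = 0
--     for i in range(0, len(results)):
--         _, result = results[i]
--         operator = terms[j]  # Obtener el operador que precede al término
--         if operator == '+':
--             final_result += result
--             j = j + 2
--         elif operator != '-':
--             final_result += result
--             j = j + 1
--         elif operator == '-':
--             final_result -= result
--             j = j + 2
--     return final_result
-- ===== SOURCE B (Python) =====
-- def calculate_final_result(terms, results):
--     # Phase 1: extract the operator sequence by scanning the terms list itself with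
--     # a skip flag ('+'/'-' consume their following operand token), no index stepping.
--     ops = []
--     skip = False
--     for t in terms:
--         if skip:
--             skip = False
--         else:
--             ops.append(t)
--             if t == '+' or t == '-':
--                 skip = True
--     # Phase 2: signed reduction over the zipped data.
--     total = 0
--     for (_, r), op in zip(results, ops):
--         total += -r if op == '-' else r
--     return total
-- ===== Notes on version B (the rewrite author's own statement) =====
-- stated objective: alternative
-- what changed: Replaces A's single loop over results that steps an index j into terms by a skip-flag scan over the terms list itself extracting the operator sequence, followed by a signed reduction over the zipped results/operators.
import Mathlib
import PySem

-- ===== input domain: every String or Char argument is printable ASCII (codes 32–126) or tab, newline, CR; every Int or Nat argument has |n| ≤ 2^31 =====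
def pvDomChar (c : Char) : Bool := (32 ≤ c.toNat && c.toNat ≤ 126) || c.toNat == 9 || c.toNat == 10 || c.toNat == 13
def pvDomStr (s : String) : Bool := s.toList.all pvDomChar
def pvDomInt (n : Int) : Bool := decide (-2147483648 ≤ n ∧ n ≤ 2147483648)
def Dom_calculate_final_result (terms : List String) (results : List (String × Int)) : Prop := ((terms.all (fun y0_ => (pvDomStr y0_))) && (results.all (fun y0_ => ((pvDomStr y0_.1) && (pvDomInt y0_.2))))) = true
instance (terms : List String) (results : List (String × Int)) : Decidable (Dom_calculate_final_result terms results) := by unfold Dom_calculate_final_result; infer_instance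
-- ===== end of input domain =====

-- B replaces A's results-loop with a stepped index into terms by two passes of a different
-- shape: a skip-flag scan over the TERMS list extracting the operator sequence, then a
-- signed reduction over the zipped data (objective: alternative).


-- ===== PORT A =====
-- transliteration of A's loop: state (final_result, j); terms[j] read with a default,
-- which matches Python exactly inside Pre_ (there j is always in range)
def calculate_final_result (terms : List String) (results : List (String × Int)) : Int :=
  (results.foldl (fun (st : Int × Nat) p =>
      let operator := terms.getD st.2 ""
      if operator = "+" then (st.1 + p.2, st.2 + 2)
      else if operator ≠ "-" then (st.1 + p.2, st.2 + 1)
      else if operator = "-" then (st.1 - p.2, st.2 + 2)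
      else st) ((0 : Int), (0 : Nat))).1

-- ===== PORT B =====
-- phase 1 of Source B: the skip-flag scan over the terms list extracting the operators
def pvOps : List String → Bool → List String
  | [], _ => []
  | _ :: rest, true => pvOps rest false
  | t :: rest, false => t :: pvOps rest (t = "+" || t = "-")

def calculate_final_result_alt (terms : List String) (results : List (String × Int)) : Int :=
  -- phase 2 of Source B: total += -r if op == '-' else r, over zip(results, ops)
  (results.zip (pvOps terms false)).foldl
    (fun total p => total + (if p.2 = "-" then -p.1.2 else p.1.2)) 0

-- ===== PRECONDITION & SPEC =====
-- capacity of the operator walk over terms: how many operators Python can read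
-- before the index j leaves the list ('+'/'-' step 2, anything else step 1)
def pvOpCap : List String → Nat
  | [] => 0
  | [_] => 1
  | t :: u :: rest => 1 + (if t = "+" ∨ t = "-" then pvOpCap rest else pvOpCap (u :: rest))

-- Pre_ excludes exactly the inputs on which Python A raises IndexError (terms[j] out of range)
def Pre_calculate_final_result (terms : List String) (results : List (String × Int)) : Prop :=
  results.length ≤ pvOpCap terms
instance (terms : List String) (results : List (String × Int)) : Decidable (Pre_calculate_final_result terms results) := by unfold Pre_calculate_final_result; infer_instance
def pvWitness_calculate_final_result : List String × (List (String × Int)) :=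
  (["+", "x", "-", "y"], [("3", 3), ("4", 4)])

def Spec_calculate_final_result (terms : List String) (results : List (String × Int)) (out : Int) : Prop := out = calculate_final_result_alt terms results
instance (terms : List String) (results : List (String × Int)) (out : Int) : Decidable (Spec_calculate_final_result terms results out) := by unfold Spec_calculate_final_result; infer_instance

-- ===== CLAIM (what is proved, stated in full; the proofs are below) =====
def Claim_equal_calculate_final_result : Prop := ∀ (terms : List String) (results : List (String × Int)), Dom_calculate_final_result terms results → Pre_calculate_final_result terms results → Spec_calculate_final_result terms results (calculate_final_result terms results)

-- ===== LEMMAS AND PROOFS =====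
-- A's walk rephrased on the SUFFIX of terms (proof helper; related to A's fold by pvFoldA_eq)
def pvFoldS (ts : List String) : List (String × Int) → Int → Int
  | [], acc => acc
  | p :: rest, acc =>
      let op := ts.getD 0 ""
      if op = "+" then pvFoldS (ts.drop 2) rest (acc + p.2)
      else if op ≠ "-" then pvFoldS (ts.drop 1) rest (acc + p.2)
      else pvFoldS (ts.drop 2) rest (acc - p.2)

theorem pvFoldA_eq (terms : List String) (results : List (String × Int)) :
    ∀ (j : Nat) (acc : Int),
    (results.foldl (fun (st : Int × Nat) p =>
      let operator := terms.getD st.2 ""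
      if operator = "+" then (st.1 + p.2, st.2 + 2)
      else if operator ≠ "-" then (st.1 + p.2, st.2 + 1)
      else if operator = "-" then (st.1 - p.2, st.2 + 2)
      else st) (acc, j)).1
      = pvFoldS (terms.drop j) results acc := by
  induction results with
  | nil => intro j acc; simp [pvFoldS]
  | cons p rest ih =>
      intro j acc
      have hget : terms.getD j "" = (terms.drop j).getD 0 "" := by
        simp [List.getD, List.getElem?_drop]
      have hd2 : (terms.drop j).drop 2 = terms.drop (j + 2) := by
        rw [List.drop_drop]
      have hd1 : (terms.drop j).drop 1 = terms.drop (j + 1) := by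
        rw [List.drop_drop]
      simp only [List.foldl_cons, pvFoldS, ← hget, hd1, hd2]
      by_cases h1 : terms.getD j "" = "+"
      · rw [if_pos h1, if_pos h1, ih (j + 2) (acc + p.2)]
      · by_cases h2 : terms.getD j "" = "-"
        · rw [if_neg h1, if_neg (not_not_intro h2), if_pos h2,
              if_neg h1, if_neg (not_not_intro h2)]
          exact ih (j + 2) (acc - p.2)
        · rw [if_neg h1, if_pos h2, if_neg h1, if_pos h2, ih (j + 1) (acc + p.2)]

theorem pvFoldS_eq_zip (results : List (String × Int)) :
    ∀ (ts : List String) (acc : Int), results.length ≤ pvOpCap ts →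
    pvFoldS ts results acc
      = (results.zip (pvOps ts false)).foldl
          (fun total p => total + (if p.2 = "-" then -p.1.2 else p.1.2)) acc := by
  induction results with
  | nil => intro ts acc _; simp [pvFoldS]
  | cons p rest ih =>
      intro ts acc h
      match ts with
      | [] => simp [pvOpCap] at h
      | t :: u =>
        by_cases h1 : t = "+"
        · subst h1
          match u with
          | [] =>
              have hr : rest = [] := by
                simp only [pvOpCap, List.length_cons] at h
                exact List.eq_nil_of_length_eq_zero (by omega)
              subst hr; simp [pvFoldS, pvOps]
          | v :: w =>
              have hcap : rest.length ≤ pvOpCap w := by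
                simp only [pvOpCap, List.length_cons, true_or, if_true] at h
                omega
              simp [pvFoldS, pvOps, ih w (acc + p.2) hcap]
        · by_cases h2 : t = "-"
          · subst h2
            match u with
            | [] =>
                have hr : rest = [] := by
                  simp only [pvOpCap, List.length_cons] at h
                  exact List.eq_nil_of_length_eq_zero (by omega)
                subst hr; simp [pvFoldS, pvOps]; ring
            | v :: w =>
                have hcap : rest.length ≤ pvOpCap w := by
                  simp only [pvOpCap, List.length_cons, or_true, if_true] at h
                  omega
                simpa [pvFoldS, pvOps, sub_eq_add_neg] using ih w (acc - p.2) hcap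
          · match u with
            | [] =>
                have hr : rest = [] := by
                  simp only [pvOpCap, List.length_cons] at h
                  exact List.eq_nil_of_length_eq_zero (by omega)
                subst hr; simp [pvFoldS, pvOps, h1, h2]
            | v :: w =>
                have hcap : rest.length ≤ pvOpCap (v :: w) := by
                  simp only [pvOpCap, List.length_cons] at h
                  rw [if_neg (by simp [h1, h2])] at h; omega
                simp [pvFoldS, pvOps, h1, h2, ih (v :: w) (acc + p.2) hcap]

-- ===== VERDICT (by name: the statement is the Claim_ definition above) =====
theorem calculate_final_result_spec : Claim_equal_calculate_final_result := by
  intro terms results _ hpre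
  unfold Spec_calculate_final_result calculate_final_result calculate_final_result_alt
  rw [pvFoldA_eq terms results 0 0]
  simpa using pvFoldS_eq_zip results terms 0 hpre
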